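-- pv_equiv track=rewrite | github.com/asoderlind/TDDE09_Project | parsing.py | zero_cost_ra
-- ===== SOURCE A (Python) =====
-- def zero_cost_ra(
--     config: tuple[int, list[int], list[int]], gold_heads: list[int]
-- ) -> bool:
--     pos, stack, heads = config
--
--     # if we pop stack[-1], it won't be able to find its gold-standard dependant.
--     for buffer_pos in range(pos, len(heads)):
--         if stack[-1] == gold_heads[buffer_pos]:
--             return False
--
--     # making a RA transition will pop stack[-1], it won't be able to find its
--     # gold-standard head.
--     for buffer_pos in range(pos, len(heads)):
--         if buffer_pos == gold_heads[stack[-1]]: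
--             return False
--     return True
-- ===== SOURCE B (Python) =====
-- def zero_cost_ra(
--     config: tuple[int, list[int], list[int]], gold_heads: list[int]
-- ) -> bool:
--     pos, stack, heads = config
--     n = len(heads)
--     # dependant check: one scan (same indices/accesses as before)
--     if any(stack[-1] == gold_heads[i] for i in range(pos, n)):
--         return False
--     # head check: closed-form membership test instead of a scan
--     if pos < n and pos <= gold_heads[stack[-1]] < n:
--         return False
--     return True
-- ===== Notes on version B (the rewrite author's own statement) =====
-- stated objective: simpler
-- what changed: A's second linear scan over the buffer positions is replaced by a single guarded closed-form range-membership test (pos <= gold_heads[stack[-1]] < len(heads)), and the first scan becomes an any(...); the remaining work after the first scan drops from O(n) to O(1).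
import Mathlib
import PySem

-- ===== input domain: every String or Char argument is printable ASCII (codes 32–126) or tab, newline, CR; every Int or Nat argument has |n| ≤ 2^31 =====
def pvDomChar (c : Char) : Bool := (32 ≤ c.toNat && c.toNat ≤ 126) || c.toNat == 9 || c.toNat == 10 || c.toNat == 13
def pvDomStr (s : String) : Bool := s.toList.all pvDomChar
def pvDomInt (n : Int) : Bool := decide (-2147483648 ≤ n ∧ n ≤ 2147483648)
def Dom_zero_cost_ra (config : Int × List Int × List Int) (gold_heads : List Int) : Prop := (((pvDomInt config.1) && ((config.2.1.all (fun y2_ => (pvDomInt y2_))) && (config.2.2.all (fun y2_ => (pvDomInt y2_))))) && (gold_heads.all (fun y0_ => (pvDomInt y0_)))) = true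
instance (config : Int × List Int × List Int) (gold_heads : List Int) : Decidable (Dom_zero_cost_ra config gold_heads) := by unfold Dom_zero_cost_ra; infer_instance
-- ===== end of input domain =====

-- B replaces A's second linear scan by a closed-form range-membership test (objective: simpler).

-- ===== PORT A =====
-- first loop: return True (= Python's early `return False`) on the first buffer position whose gold head is stack[-1]
def zcraLoop1 (stack gold_heads : List Int) : List Int → Bool
  | [] => false
  | i :: rest =>
    if PySem.List.pyGetD stack (-1) 0 == PySem.List.pyGetD gold_heads i 0 then true
    else zcraLoop1 stack gold_heads rest

-- second loop: return True on the first buffer position equal to gold_heads[stack[-1]]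
def zcraLoop2 (stack gold_heads : List Int) : List Int → Bool
  | [] => false
  | i :: rest =>
    if i == PySem.List.pyGetD gold_heads (PySem.List.pyGetD stack (-1) 0) 0 then true
    else zcraLoop2 stack gold_heads rest

def zero_cost_ra (config : Int × List Int × List Int) (gold_heads : List Int) : Bool :=
  let pos := config.1
  let stack := config.2.1
  let heads := config.2.2
  let rng := PySem.List.pyRange pos (heads.length : Int) 1
  if zcraLoop1 stack gold_heads rng then false
  else if zcraLoop2 stack gold_heads rng then false
  else true

-- ===== PORT B =====
def zero_cost_ra_alt (config : Int × List Int × List Int) (gold_heads : List Int) : Bool :=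
  let pos := config.1
  let stack := config.2.1
  let heads := config.2.2
  let n : Int := (heads.length : Int)
  if (PySem.List.pyRange pos n 1).any
      (fun i => PySem.List.pyGetD stack (-1) 0 == PySem.List.pyGetD gold_heads i 0) then false
  else if pos < n ∧ pos ≤ PySem.List.pyGetD gold_heads (PySem.List.pyGetD stack (-1) 0) 0
          ∧ PySem.List.pyGetD gold_heads (PySem.List.pyGetD stack (-1) 0) 0 < n then false
  else true

-- ===== PRECONDITION & SPEC =====
-- Pre_ holds exactly where Python A returns: A raises IndexError when the scanned range is nonempty
-- and the stack is empty, when it reaches an index of gold_heads outside [-len, len) before a match,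
-- or when (no match found) gold_heads[stack[-1]] is out of range.
def Pre_zero_cost_ra (config : Int × List Int × List Int) (gold_heads : List Int) : Prop :=
  let pos := config.1
  let stack := config.2.1
  let n : Int := (config.2.2.length : Int)
  let L : Int := (gold_heads.length : Int)
  let t := stack.getLastD 0
  n ≤ pos ∨ (stack ≠ [] ∧ -L ≤ pos ∧
    ((∃ j ∈ PySem.List.pyRange pos (min n L) 1, PySem.List.pyGetD gold_heads j 0 = t) ∨
     (n ≤ L ∧ -L ≤ t ∧ t < L)))
instance (config : Int × List Int × List Int) (gold_heads : List Int) : Decidable (Pre_zero_cost_ra config gold_heads) := by unfold Pre_zero_cost_ra; infer_instance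

def pvWitness_zero_cost_ra : (Int × List Int × List Int) × List Int := ((0, [0], [0]), [0])

def Spec_zero_cost_ra (config : Int × List Int × List Int) (gold_heads : List Int) (out : Bool) : Prop := out = zero_cost_ra_alt config gold_heads
instance (config : Int × List Int × List Int) (gold_heads : List Int) (out : Bool) : Decidable (Spec_zero_cost_ra config gold_heads out) := by unfold Spec_zero_cost_ra; infer_instance

-- ===== CLAIM (what is proved, stated in full; the proofs are below) =====
def Claim_equal_zero_cost_ra : Prop := ∀ (config : Int × List Int × List Int) (gold_heads : List Int), Dom_zero_cost_ra config gold_heads → Pre_zero_cost_ra config gold_heads → Spec_zero_cost_ra config gold_heads (zero_cost_ra config gold_heads)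

-- ===== LEMMAS AND PROOFS =====
theorem zcraLoop1_eq_any (stack gold_heads : List Int) (l : List Int) :
    zcraLoop1 stack gold_heads l
      = l.any (fun i => PySem.List.pyGetD stack (-1) 0 == PySem.List.pyGetD gold_heads i 0) := by
  induction l with
  | nil => simp [zcraLoop1]
  | cons i rest ih =>
    simp only [zcraLoop1, List.any_cons]
    split_ifs with h
    · simp [h]
    · simp [h, ih]

theorem zcraLoop2_eq_mem (stack gold_heads : List Int) (l : List Int) :
    zcraLoop2 stack gold_heads l
      = decide (PySem.List.pyGetD gold_heads (PySem.List.pyGetD stack (-1) 0) 0 ∈ l) := by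
  induction l with
  | nil => simp [zcraLoop2]
  | cons i rest ih =>
    simp only [zcraLoop2]
    split_ifs with h
    · simp only [beq_iff_eq] at h
      simp [← h]
    · simp only [beq_iff_eq] at h
      simp [ih, List.mem_cons, Ne.symm h]

-- ===== VERDICT (by name: the statement is the Claim_ definition above) =====
theorem zero_cost_ra_spec : Claim_equal_zero_cost_ra := by
  intro config gold_heads _ _
  unfold Spec_zero_cost_ra zero_cost_ra zero_cost_ra_alt
  simp only [zcraLoop1_eq_any, zcraLoop2_eq_mem]
  split_ifs with h1 h2 h3 h3 <;> try rfl
  · simp only [decide_eq_true_eq, PySem.List.mem_pyRange_one] at h2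
    omega
  · simp only [decide_eq_true_eq, PySem.List.mem_pyRange_one] at h2
    omega
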